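-- pv_equiv track=rewrite | github.com/heyvaibhavs/codeforces-questions-and-solution | unionsum.py | subsum
-- ===== SOURCE A (Python) =====
-- def subsum(n,a):
--     j,c,p=0,0,1
--     while n>0:
--         last_bit=n&1
--         if last_bit==1:
--             p=p*a[j]
--         j+=1
--         n=n>>1
--     return p
-- ===== SOURCE B (Python) =====
-- def subsum(n, a):
--     if n <= 0:
--         return 1
--     return subsum(n >> 1, a[1:]) * (a[0] if n & 1 else 1)
-- ===== Notes on version B (the rewrite author's own statement) =====
-- stated objective: simpler
-- what changed: A's while loop with an explicit index counter j into a fixed list is replaced by a three-line structural recursion that peels the list head (a[1:]) in step with the bits of n, so no index variable exists at all.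
import Mathlib
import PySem

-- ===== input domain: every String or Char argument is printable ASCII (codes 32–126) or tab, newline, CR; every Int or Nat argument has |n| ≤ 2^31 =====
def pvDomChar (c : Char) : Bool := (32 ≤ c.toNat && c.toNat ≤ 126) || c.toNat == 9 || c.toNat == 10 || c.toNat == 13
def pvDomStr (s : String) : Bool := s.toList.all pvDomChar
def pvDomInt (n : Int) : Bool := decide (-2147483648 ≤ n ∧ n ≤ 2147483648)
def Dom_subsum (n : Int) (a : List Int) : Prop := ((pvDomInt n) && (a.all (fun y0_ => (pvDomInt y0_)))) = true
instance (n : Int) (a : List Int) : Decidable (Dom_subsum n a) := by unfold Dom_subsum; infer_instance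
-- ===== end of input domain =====

-- B replaces A's index-counting while loop by a short structural recursion that peels the
-- list (a[1:]) alongside the bits of n; objective: simpler. Return values only
-- (neither version mutates its arguments).

-- termination helper for both ports (cited in decreasing_by)
theorem pvShift1_toNat_lt (n : Int) (h : 0 < n) : (n >>> (1 : Int)).toNat < n.toNat := by
  cases n with
  | ofNat m =>
      have e1 : ((Int.ofNat m) >>> (1 : Int)).toNat = m >>> 1 := rfl
      have e2 : (Int.ofNat m).toNat = m := rfl
      have hm : 0 < m := by rw [Int.ofNat_eq_natCast] at h; exact_mod_cast h
      rw [e1, e2, Nat.shiftRight_one]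
      omega
  | negSucc m => exact absurd h (by exact of_decide_eq_false rfl)

-- ===== PORT A =====
-- while loop of A as recursion over the state (n, j, c, p); c is dead state A carries along.
-- a[j] (IndexError possible in Python) is ported as (pyGet? a j).getD 0; Pre_subsum excludes
-- the raising inputs.  Python's n & 1 is Int.land n 1 (exact), n >> 1 is n >>> 1 (exact).
def subsumLoop (n : Int) (a : List Int) (j c p : Int) : Int :=
  if h : n > 0 then
    let last_bit := Int.land n 1
    let p' := if last_bit = 1 then p * (PySem.List.pyGet? a j).getD 0 else p
    subsumLoop (n >>> (1 : Int)) a (j + 1) c p'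
  else p
termination_by n.toNat
decreasing_by exact pvShift1_toNat_lt n h

def subsum (n : Int) (a : List Int) : Int := subsumLoop n a 0 0 1

-- ===== PORT B =====
-- literal transliteration of Source B: if n <= 0: return 1; return subsum(n >> 1, a[1:]) * (a[0] if n & 1 else 1)
def subsum_alt (n : Int) (a : List Int) : Int :=
  if h : n ≤ 0 then 1
  else
    subsum_alt (n >>> (1 : Int)) (PySem.List.slice a (some 1) none) *
      (if Int.land n 1 ≠ 0 then (PySem.List.pyGet? a 0).getD 0 else 1)
termination_by n.toNat
decreasing_by exact pvShift1_toNat_lt n (by omega)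

-- ===== PRECONDITION & SPEC =====
-- Pre_ excludes exactly the inputs where Python A raises IndexError: some set bit of n is at
-- an index ≥ len(a), i.e. n ≥ 2^len(a).  (Negative n returns 1 at once and is admitted.)
def Pre_subsum (n : Int) (a : List Int) : Prop := n < 2 ^ a.length
instance (n : Int) (a : List Int) : Decidable (Pre_subsum n a) := by unfold Pre_subsum; infer_instance
def pvWitness_subsum : Int × List Int := (5, [2, 3, 4])

def Spec_subsum (n : Int) (a : List Int) (out : Int) : Prop := out = subsum_alt n a
instance (n : Int) (a : List Int) (out : Int) : Decidable (Spec_subsum n a out) := by unfold Spec_subsum; infer_instance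

-- ===== CLAIM (what is proved, stated in full; the proofs are below) =====
def Claim_equal_subsum : Prop := ∀ (n : Int) (a : List Int), Dom_subsum n a → Pre_subsum n a → Spec_subsum n a (subsum n a)

-- ===== LEMMAS AND PROOFS =====

-- controlled unfolding lemmas for the two well-founded recursions
theorem subsumLoop_eq (n : Int) (a : List Int) (j c p : Int) :
    subsumLoop n a j c p =
      if n > 0 then
        subsumLoop (n >>> (1 : Int)) a (j + 1) c
          (if Int.land n 1 = 1 then p * (PySem.List.pyGet? a j).getD 0 else p)
      else p := by
  rw [subsumLoop]
  by_cases h : n > 0 <;> simp [h]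

theorem subsum_alt_eq (n : Int) (a : List Int) :
    subsum_alt n a =
      if n ≤ 0 then 1
      else
        subsum_alt (n >>> (1 : Int)) (PySem.List.slice a (some 1) none) *
          (if Int.land n 1 ≠ 0 then (PySem.List.pyGet? a 0).getD 0 else 1) := by
  rw [subsum_alt]
  by_cases h : n ≤ 0 <;> simp [h]

-- Python's n & 1 is 0 or 1 for positive n
theorem pvLand1 (n : Int) (h : 0 < n) : Int.land n 1 = 0 ∨ Int.land n 1 = 1 := by
  cases n with
  | ofNat m =>
      have e : Int.land (Int.ofNat m) 1 = Int.ofNat (m &&& 1) := rfl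
      rw [e, Nat.and_one_is_mod, Int.ofNat_eq_natCast]
      omega
  | negSucc m => exact absurd h (by exact of_decide_eq_false rfl)

theorem pvGet_shift (a : List Int) (j : Int) (hj : 0 ≤ j) :
    PySem.List.pyGet? a (j + 1) = PySem.List.pyGet? (a.drop 1) j := by
  rw [PySem.List.pyGet?_of_nonneg a (show (0:Int) ≤ j + 1 by omega),
      PySem.List.pyGet?_of_nonneg (a.drop 1) hj]
  rw [List.getElem?_drop]
  congr 1
  omega

-- shifting A's absolute index by one is the same as dropping the head of the list
theorem pvLoop_shift (k : Nat) : ∀ (n : Int) (a : List Int) (j c p : Int),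
    n.toNat ≤ k → 0 ≤ j →
    subsumLoop n a (j + 1) c p = subsumLoop n (a.drop 1) j c p := by
  induction k with
  | zero =>
      intro n a j c p hk _
      rw [subsumLoop_eq n a (j + 1) c p, if_neg (by omega),
          subsumLoop_eq n (a.drop 1) j c p, if_neg (by omega)]
  | succ k ih =>
      intro n a j c p hk hj
      by_cases h : n > 0
      · rw [subsumLoop_eq n a (j + 1) c p, if_pos h,
            subsumLoop_eq n (a.drop 1) j c p, if_pos h]
        rw [pvGet_shift a j hj]
        exact ih (n >>> (1 : Int)) a (j + 1) c _
          (by have := pvShift1_toNat_lt n h; omega) (by omega)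
      · rw [subsumLoop_eq n a (j + 1) c p, if_neg h,
            subsumLoop_eq n (a.drop 1) j c p, if_neg h]

theorem pvMain (k : Nat) : ∀ (n : Int) (a : List Int) (c p : Int),
    n.toNat ≤ k → subsumLoop n a 0 c p = p * subsum_alt n a := by
  induction k with
  | zero =>
      intro n a c p hk
      rw [subsumLoop_eq n a 0 c p, if_neg (by omega),
          subsum_alt_eq n a, if_pos (by omega), mul_one]
  | succ k ih =>
      intro n a c p hk
      by_cases h : n > 0
      · have hlt := pvShift1_toNat_lt n h
        have hk' : (n >>> (1 : Int)).toNat ≤ k := by omega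
        rw [subsumLoop_eq n a 0 c p, if_pos h]
        rw [pvLoop_shift k (n >>> (1 : Int)) a 0 c _ hk' le_rfl]
        rw [ih (n >>> (1 : Int)) (a.drop 1) c _ hk']
        rw [subsum_alt_eq n a, if_neg (show ¬ n ≤ 0 by omega)]
        rw [PySem.List.slice_from_one, ← List.drop_one]
        rcases pvLand1 n h with h1 | h1 <;> rw [h1] <;> simp [mul_comm, mul_left_comm]
      · rw [subsumLoop_eq n a 0 c p, if_neg h,
            subsum_alt_eq n a, if_pos (by omega), mul_one]

-- ===== VERDICT (by name: the statement is the Claim_ definition above) =====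
theorem subsum_spec : Claim_equal_subsum := by
  intro n a _ _
  unfold Spec_subsum subsum
  rw [pvMain n.toNat n a 0 1 le_rfl]
  rw [one_mul]
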